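-- pv_equiv track=rewrite | github.com/YuneeeM/Python_Algorithm | 프로그래머스/2023/pccp/day6/0115-1.py | solution
-- ===== SOURCE A (Python) =====
-- def solution(input_string):
--     answer = ''
--     temp = set()  # 외톨이 문자
--     alpha = set()
--
--     # 맨뒤 문자 비교
--     input_string += ' '
--
--     for i in range(len(input_string)-1):
--         if input_string[i] != input_string[i+1]:
--             if input_string[i] not in alpha:
--                 alpha.add(input_string[i])
--             else:
--                 temp.add(input_string[i])
--
--     if len(temp) == 0:
--         answer = 'N'
--     else:
--         temp = list(temp)
--         temp.sort()
--         answer = ''.join(temp)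
--
--     return answer
-- ===== SOURCE B (Python) =====
-- def solution(input_string):
--     # phase 1: materialize the run characters (one per maximal block of equal chars)
--     runs = []
--     for c in input_string:
--         if not runs or runs[-1] != c:
--             runs.append(c)
--     # a trailing space run is never recorded by the original boundary scan
--     if runs and runs[-1] == ' ':
--         runs.pop()
--     # phase 2: tally run characters, keep those with >= 2 runs
--     counts = {}
--     for c in runs:
--         counts[c] = counts.get(c, 0) + 1
--     lonely = sorted(c for c in counts if counts[c] >= 2)
--     return ''.join(lonely) if lonely else 'N'
-- ===== Notes on version B (the rewrite author's own statement) =====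
-- stated objective: idiomatic
-- what changed: A does a single boundary scan over adjacent index pairs of the space-padded string, classifying each boundary char into two sets; B instead materializes the run-character list (popping a trailing space run), tallies it with a dict counter, and sorts the chars occurring in >= 2 runs.
import Mathlib
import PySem

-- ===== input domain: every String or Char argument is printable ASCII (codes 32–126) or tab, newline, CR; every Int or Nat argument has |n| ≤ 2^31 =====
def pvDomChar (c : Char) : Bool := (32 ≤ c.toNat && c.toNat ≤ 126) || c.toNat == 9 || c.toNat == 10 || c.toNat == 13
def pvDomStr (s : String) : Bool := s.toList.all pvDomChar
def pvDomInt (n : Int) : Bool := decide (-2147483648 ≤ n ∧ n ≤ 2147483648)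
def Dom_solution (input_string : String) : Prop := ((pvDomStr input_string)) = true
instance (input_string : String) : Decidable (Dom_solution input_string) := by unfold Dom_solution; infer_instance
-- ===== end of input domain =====

-- B replaces A's single padded boundary scan with run-list materialization + dict tally (idiomatic decomposition, same cost).

-- ===== PORT A =====
-- A's loop body: compare input_string[i] with input_string[i+1] (both always in range), sort boundary char into alpha/temp.
def solutionStep (st : PySem.Set Char × PySem.Set Char) (c1 c2 : Char) :
    PySem.Set Char × PySem.Set Char :=
  if c1 ≠ c2 then
    if ¬ (c1 ∈ st.1) then (PySem.Set.add st.1 c1, st.2) else (st.1, PySem.Set.add st.2 c1)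
  else st

def solution (input_string : String) : String :=
  -- input_string += ' '
  let s : List Char := input_string.toList ++ [' ']
  -- for i in range(len(input_string)-1): … s[i] … s[i+1] …  (indices are always in range, so pyGetD is exact)
  let st := (PySem.List.pyRange 0 ((s.length : Int) - 1) 1).foldl
      (fun st i => solutionStep st (PySem.List.pyGetD s i ' ') (PySem.List.pyGetD s (i + 1) ' '))
      (PySem.Set.empty, PySem.Set.empty)
  let temp := st.2
  if PySem.Set.len temp = 0 then "N"
  else String.ofList (PySem.List.sorted temp (fun x => x) false)

-- ===== PORT B =====
def solution_alt (input_string : String) : String :=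
  let runs : List Char := input_string.toList.foldl
      (fun r c => if r = [] ∨ r.getLast? ≠ some c then r ++ [c] else r) []
  let runs := if runs ≠ [] ∧ runs.getLast? = some ' ' then runs.dropLast else runs
  let counts : PySem.Dict Char Int := runs.foldl
      (fun d c => d.insert c (d.getD c 0 + 1)) PySem.Dict.empty
  -- counts[c] for c a key of counts: getD is exact here
  let lonely := PySem.List.sorted
      ((PySem.Dict.keys counts).filter (fun c => decide (2 ≤ counts.getD c 0))) (fun x => x) false
  if lonely ≠ [] then String.ofList lonely else "N"

-- ===== PRECONDITION & SPEC =====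
def Spec_solution (input_string : String) (out : String) : Prop := out = solution_alt input_string
instance (input_string : String) (out : String) : Decidable (Spec_solution input_string out) := by unfold Spec_solution; infer_instance

-- ===== CLAIM (what is proved, stated in full; the proofs are below) =====
def Claim_equal_solution : Prop := ∀ (input_string : String), Dom_solution input_string → Spec_solution input_string (solution input_string)

-- ===== LEMMAS AND PROOFS =====

-- boundary processing of one differing-pair char (A's inner if/else)
def pvProc (st : PySem.Set Char × PySem.Set Char) (c : Char) :
    PySem.Set Char × PySem.Set Char :=
  if ¬ (c ∈ st.1) then (PySem.Set.add st.1 c, st.2) else (st.1, PySem.Set.add st.2 c)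

-- the list of boundary characters: s[i] at positions where s[i] ≠ s[i+1]
def pvBnd : List Char → List Char
  | c1 :: c2 :: t => (if c1 ≠ c2 then [c1] else []) ++ pvBnd (c2 :: t)
  | _ => []

-- run characters of l, given the previous character x
def pvTR (x : Char) : List Char → List Char
  | [] => []
  | c :: t => if c = x then pvTR x t else c :: pvTR c t

def pvRunsS : List Char → List Char
  | [] => []
  | c :: t => c :: pvTR c t

def pvDrop (r : List Char) : List Char :=
  if r ≠ [] ∧ r.getLast? = some ' ' then r.dropLast else r

-- A's index loop is the fold over adjacent pairs
theorem pvFoldRange {σ : Type} (f : σ → Char → Char → σ) :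
    ∀ (xs : List Char) (init : σ),
      (List.range (xs.length - 1)).foldl
          (fun acc k => f acc (xs.getD k ' ') (xs.getD (k + 1) ' ')) init
        = (xs.zip xs.tail).foldl (fun acc p => f acc p.1 p.2) init
  | [], _ => rfl
  | [_], _ => rfl
  | c1 :: c2 :: t, init => by
    have ih := pvFoldRange f (c2 :: t) (f init c1 c2)
    simp only [List.length_cons, List.zip_cons_cons, List.tail_cons, List.foldl_cons]
    have h1 : t.length + 1 + 1 - 1 = t.length + 1 := by omega
    rw [h1, List.range_succ_eq_map, List.foldl_cons, List.foldl_map]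
    simp only [List.getD_cons_zero, List.getD_cons_succ] at ih ⊢
    exact ih

-- the pair fold with A's step is the fold of pvProc over the boundary characters
theorem pvPairsBnd :
    ∀ (xs : List Char) (init : PySem.Set Char × PySem.Set Char),
      (xs.zip xs.tail).foldl (fun acc p => solutionStep acc p.1 p.2) init
        = (pvBnd xs).foldl pvProc init
  | [], _ => rfl
  | [_], _ => rfl
  | c1 :: c2 :: t, init => by
    have ih := pvPairsBnd (c2 :: t) (solutionStep init c1 c2)
    simp only [List.tail_cons] at ih
    simp only [List.zip_cons_cons, List.tail_cons, List.foldl_cons]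
    rw [ih]
    have hb : pvBnd (c1 :: c2 :: t) = (if c1 ≠ c2 then [c1] else []) ++ pvBnd (c2 :: t) := rfl
    rw [hb, List.foldl_append]
    by_cases h : c1 = c2 <;> simp [solutionStep, pvProc, h]

-- B's run-building loop, with a nonempty accumulator
theorem pvRunsAcc :
    ∀ (l r : List Char) (x : Char), r.getLast? = some x →
      l.foldl (fun r c => if r = [] ∨ r.getLast? ≠ some c then r ++ [c] else r) r
        = r ++ pvTR x l
  | [], r, x, _ => by simp [pvTR]
  | c :: t, r, x, h => by
    have hr : r ≠ [] := by rintro rfl; simp at h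
    by_cases hc : c = x
    · subst hc
      simp only [List.foldl_cons, hr, h, pvTR]
      simp [pvRunsAcc t r c h]
    · have hne : r.getLast? ≠ some c := by rw [h]; simp [Ne.symm hc]
      have hlast : (r ++ [c]).getLast? = some c := by simp
      rw [List.foldl_cons, if_pos (Or.inr hne)]
      rw [pvRunsAcc t (r ++ [c]) c hlast]
      simp [pvTR, hc]

theorem pvRuns_eq (l : List Char) :
    l.foldl (fun r c => if r = [] ∨ r.getLast? ≠ some c then r ++ [c] else r) []
      = pvRunsS l := by
  cases l with
  | nil => rfl
  | cons c t =>
    simp only [List.foldl_cons, pvRunsS]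
    have : ([] : List Char) ++ [c] = [c] := rfl
    simpa using pvRunsAcc t [c] c (by simp)

theorem pvDrop_cons (x : Char) (r : List Char) (hr : r ≠ []) :
    pvDrop (x :: r) = x :: pvDrop r := by
  have hg : (x :: r).getLast? = r.getLast? := by
    cases r with
    | nil => exact absurd rfl hr
    | cons a t => simp [List.getLast?_cons_cons]
  unfold pvDrop
  rw [hg, List.dropLast_cons_of_ne_nil hr]
  by_cases h : r.getLast? = some ' ' <;> simp [h, hr]

-- boundaries of the space-padded string are the runs with a trailing-space run dropped
theorem pvBndDrop :
    ∀ (l : List Char) (x : Char), pvBnd (x :: l ++ [' ']) = pvDrop (x :: pvTR x l)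
  | [], x => by
    by_cases h : x = ' ' <;> simp [pvBnd, pvTR, pvDrop, h]
  | c :: t, x => by
    by_cases hc : c = x
    · subst hc
      simp only [pvTR]
      have := pvBndDrop t c
      simpa [pvBnd] using this
    · have h1 : pvTR x (c :: t) = c :: pvTR c t := by simp [pvTR, hc]
      have h2 : pvBnd (x :: (c :: t) ++ [' ']) = [x] ++ pvBnd (c :: t ++ [' ']) := by
        simp [pvBnd, Ne.symm hc]
      rw [h1, h2, pvBndDrop t c, pvDrop_cons x (c :: pvTR c t) (by simp)]
      rfl

theorem pvBndDrop' (l : List Char) : pvBnd (l ++ [' ']) = pvDrop (pvRunsS l) := by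
  cases l with
  | nil => rfl
  | cons c t => exact pvBndDrop t c

-- characterization of A's two sets after processing a record list
theorem pvFoldProc (rec : List Char) :
    (rec.foldl pvProc (PySem.Set.empty, PySem.Set.empty)).1 = PySem.Set.ofList rec ∧
    ((rec.foldl pvProc (PySem.Set.empty, PySem.Set.empty)).2 : List Char).Nodup ∧
    ∀ x, x ∈ (rec.foldl pvProc (PySem.Set.empty, PySem.Set.empty)).2 ↔ 2 ≤ rec.count x := by
  induction rec using List.reverseRecOn with
  | nil => exact ⟨rfl, List.nodup_nil, by simp [PySem.Set.empty]⟩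
  | append_singleton l c ih =>
    obtain ⟨h1, h2, h3⟩ := ih
    rw [List.foldl_append, List.foldl_cons, List.foldl_nil]
    generalize hF : List.foldl pvProc (PySem.Set.empty, PySem.Set.empty) l = F at h1 h2 h3
    simp only [pvProc, h1]
    by_cases hc : c ∈ PySem.Set.ofList l
    · have hcl : c ∈ l := (PySem.Set.mem_ofList _ _).1 hc
      rw [if_neg (not_not_intro hc)]
      refine ⟨?_, ?_, ?_⟩
      · show PySem.Set.ofList l = PySem.Set.ofList (l ++ [c])
        rw [PySem.Set.ofList_append_singleton, PySem.Set.add_of_mem hc]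
      · show (PySem.Set.add F.2 c).Nodup
        exact PySem.Set.nodup_add F.2 c h2
      · intro x
        show x ∈ PySem.Set.add F.2 c ↔ _
        rw [PySem.Set.mem_add, h3 x, List.count_append]
        by_cases hx : x = c
        · subst hx
          have := List.count_pos_iff.2 hcl
          simp; omega
        · have : ([c]).count x = 0 := by simp [Ne.symm hx]
          simp [hx, this]
    · have hcl : c ∉ l := fun h => hc ((PySem.Set.mem_ofList _ _).2 h)
      rw [if_pos hc]
      refine ⟨?_, h2, ?_⟩
      · show PySem.Set.add (PySem.Set.ofList l) c = PySem.Set.ofList (l ++ [c])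
        rw [PySem.Set.ofList_append_singleton]
      · intro x
        show x ∈ F.2 ↔ _
        rw [h3 x, List.count_append]
        by_cases hx : x = c
        · subst hx
          have h0 : l.count x = 0 := List.count_eq_zero.2 hcl
          simp [h0]
        · have : ([c]).count x = 0 := by simp [Ne.symm hx]
          simp [this]

-- A's pyRange fold is the pvProc fold over the boundary characters
theorem pvA_fold (s : List Char) :
    (PySem.List.pyRange 0 ((s.length : Int) - 1) 1).foldl
        (fun st i => solutionStep st (PySem.List.pyGetD s i ' ') (PySem.List.pyGetD s (i + 1) ' '))
        (PySem.Set.empty, PySem.Set.empty)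
      = (pvBnd s).foldl pvProc (PySem.Set.empty, PySem.Set.empty) := by
  cases s with
  | nil =>
    rw [PySem.List.pyRange_one_eq_nil (by norm_num)]
    rfl
  | cons a t =>
    rw [show (((a :: t).length : Int) - 1) = ((t.length : Nat) : Int) by rw [List.length_cons]; push_cast; omega]
    rw [PySem.List.pyRange_one]
    simp only [sub_zero, Int.toNat_natCast, zero_add]
    rw [List.foldl_map]
    rw [PySem.List.foldl_congr_mem (List.range t.length) _
      (fun st (k : Nat) => solutionStep st ((a :: t).getD k ' ') ((a :: t).getD (k + 1) ' ')) _
      (by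
        intro acc k _
        rw [show ((k : Int) + 1) = (((k + 1 : Nat)) : Int) by omega]
        rw [PySem.List.pyGetD_natCast, PySem.List.pyGetD_natCast])]
    rw [show t.length = (a :: t).length - 1 by simp]
    rw [pvFoldRange solutionStep (a :: t)]
    exact pvPairsBnd (a :: t) _

-- ===== VERDICT (by name: the statement is the Claim_ definition above) =====
theorem solution_spec : Claim_equal_solution := by
  intro input_string _
  unfold Spec_solution solution solution_alt
  simp only []
  rw [pvA_fold (input_string.toList ++ [' ']), pvBndDrop' input_string.toList,
      pvRuns_eq input_string.toList]
  rw [show (if pvRunsS input_string.toList ≠ [] ∧ (pvRunsS input_string.toList).getLast? = some ' '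
        then (pvRunsS input_string.toList).dropLast else pvRunsS input_string.toList)
      = pvDrop (pvRunsS input_string.toList) from rfl]
  rw [PySem.Dict.foldl_insert_getD_add_one_eq_counter]
  set rec := pvDrop (pvRunsS input_string.toList) with hrec
  obtain ⟨h1, h2, h3⟩ := pvFoldProc rec
  set tempL := (rec.foldl pvProc (PySem.Set.empty, PySem.Set.empty)).2 with htemp
  set filt := (PySem.Dict.keys (PySem.Dict.counter rec)).filter
      (fun c => decide (2 ≤ (PySem.Dict.counter rec).getD c 0)) with hfilt
  have hfilt2 : filt = (PySem.Set.ofList rec).filter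
      (fun c => decide (2 ≤ ((rec.count c : Nat) : Int))) := by
    rw [hfilt, PySem.Dict.keys_counter]
    exact List.filter_congr (fun c _ => by rw [PySem.Dict.getD_counter])
  have hmem : ∀ x, x ∈ tempL ↔ x ∈ filt := by
    intro x
    rw [hfilt2, List.mem_filter, h3 x]
    constructor
    · intro h
      have hx : x ∈ rec := List.count_pos_iff.1 (by omega)
      refine ⟨(PySem.Set.mem_ofList _ _).2 hx, by simp; exact_mod_cast h⟩
    · rintro ⟨-, h⟩
      simp at h
      exact_mod_cast h
  have hnf : filt.Nodup := by
    rw [hfilt2]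
    exact (PySem.Set.nodup_ofList rec).filter _
  have hperm : tempL.Perm filt := (List.perm_ext_iff_of_nodup h2 hnf).2 hmem
  have hsorted : PySem.List.sorted tempL (fun x => x) false
      = PySem.List.sorted filt (fun x => x) false :=
    PySem.List.sorted_eq_sorted_of_perm tempL filt (fun x => x) (fun _ _ h => h) hperm
  by_cases hN : tempL = []
  · have hf : filt = [] := by
      rw [hN] at hperm
      exact hperm.symm.eq_nil
    rw [hN, hf]
    simp [PySem.Set.len, PySem.List.sorted]
  · have hf : filt ≠ [] := fun h => hN (by rw [h] at hperm; exact hperm.eq_nil)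
    have hs : PySem.List.sorted filt (fun x => x) false ≠ [] :=
      fun h => hf ((PySem.List.sorted_eq_nil_iff _ _ _).1 h)
    rw [if_neg (by simpa [PySem.Set.len, List.length_eq_zero_iff] using hN), if_pos hs, hsorted]
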